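-- pv_equiv track=rewrite | github.com/shreevatsa/pdf-glyph-mapping | src/validate_maps.py | seq_from_t
-- ===== SOURCE A (Python) =====
-- PREC = '<CCprec>'
--
-- SUCC = '<CCsucc>'
--
-- PREC_CODE = -1
--
-- SUCC_CODE = 1
--
-- def seq_from_t(t):
--     if t:
--         parts1 = t.split(PREC)
--         for (i, part1) in enumerate(parts1):
--             if i > 0:
--                 yield PREC_CODE
--             parts2 = part1.split(SUCC)
--             for (j, part) in enumerate(parts2):
--                 if j > 0:
--                     yield SUCC_CODE
--                 for codepoint in part:
--                     yield ord(codepoint)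
-- ===== SOURCE B (Python) =====
-- PREC = '<CCprec>'
--
-- SUCC = '<CCsucc>'
--
-- PREC_CODE = -1
--
-- SUCC_CODE = 1
--
-- def seq_from_t(t):
--     if t:
--         i = 0
--         n = len(t)
--         while i < n:
--             if t.startswith(PREC, i):
--                 yield PREC_CODE
--                 i += len(PREC)
--             elif t.startswith(SUCC, i):
--                 yield SUCC_CODE
--                 i += len(SUCC)
--             else:
--                 yield ord(t[i])
--                 i += 1
-- ===== Notes on version B (the rewrite author's own statement) =====
-- stated objective: alternative
-- what changed: Replaced the nested split(PREC)/split(SUCC) list construction with a single left-to-right index scan that matches the two markers in place and yields as it goes.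
import Mathlib
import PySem

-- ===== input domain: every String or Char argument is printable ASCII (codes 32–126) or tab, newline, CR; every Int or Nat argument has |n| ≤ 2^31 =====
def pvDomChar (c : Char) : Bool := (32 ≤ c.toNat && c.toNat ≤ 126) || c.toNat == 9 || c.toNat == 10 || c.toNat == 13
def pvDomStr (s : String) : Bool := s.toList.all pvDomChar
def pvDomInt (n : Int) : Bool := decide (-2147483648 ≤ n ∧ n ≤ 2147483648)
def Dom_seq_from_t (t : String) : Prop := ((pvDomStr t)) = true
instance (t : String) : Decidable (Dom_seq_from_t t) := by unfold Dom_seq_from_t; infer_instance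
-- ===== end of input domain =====

-- B replaces A's nested split(PREC)/split(SUCC) list construction by a single left-to-right
-- scan matching the two markers in place (alternative decomposition, same asymptotic cost).

def PRECL : List Char := ['<', 'C', 'C', 'p', 'r', 'e', 'c', '>']
def SUCCL : List Char := ['<', 'C', 'C', 's', 'u', 'c', 'c', '>']
def PREC_CODE : Int := -1
def SUCC_CODE : Int := 1

-- ===== PORT A =====
-- `if t:` = emptiness test; the generator's yields become list concatenation in iteration
-- order; t.split(sep) with this non-empty sep is PySem.Chars.splitOn on the code points.
def seq_from_t (t : String) : List Int :=
  if t == "" then []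
  else
    (PySem.List.enumerate (PySem.Chars.splitOn t.toList PRECL)).flatMap (fun ip =>
      (if ip.1 > 0 then [PREC_CODE] else []) ++
      (PySem.List.enumerate (PySem.Chars.splitOn ip.2 SUCCL)).flatMap (fun jp =>
        (if jp.1 > 0 then [SUCC_CODE] else []) ++ jp.2.map (fun c => (c.toNat : Int))))

-- ===== PORT B =====
-- Source B's while loop over the index, advancing by the matched marker's length or by 1,
-- written as the structurally equivalent recursion on the remaining characters;
-- t.startswith(m, i) is exactly m.toList.isPrefixOf of the remaining characters (exact).
def scanB (l : List Char) : List Int :=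
  match l with
  | [] => []
  | c :: rest =>
    if PRECL.isPrefixOf (c :: rest) then PREC_CODE :: scanB ((c :: rest).drop PRECL.length)
    else if SUCCL.isPrefixOf (c :: rest) then SUCC_CODE :: scanB ((c :: rest).drop SUCCL.length)
    else (c.toNat : Int) :: scanB rest
termination_by l.length
decreasing_by all_goals simp [PRECL, SUCCL]

def seq_from_t_alt (t : String) : List Int :=
  if t == "" then [] else scanB t.toList

-- ===== PRECONDITION & SPEC =====
def Spec_seq_from_t (t : String) (out : List Int) : Prop := out = seq_from_t_alt t
instance (t : String) (out : List Int) : Decidable (Spec_seq_from_t t out) := by unfold Spec_seq_from_t; infer_instance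

-- ===== CLAIM (what is proved, stated in full; the proofs are below) =====
def Claim_equal_seq_from_t : Prop := ∀ (t : String), Dom_seq_from_t t → Spec_seq_from_t t (seq_from_t t)

-- ===== LEMMAS AND PROOFS =====

-- fuel-free reformulation of PySem.Chars.splitOn (greedy left-to-right split)
def splits (sep : List Char) : List Char → List (List Char)
  | [] => [[]]
  | c :: rest =>
    if sep.isPrefixOf (c :: rest) ∧ sep ≠ [] then
      [] :: splits sep ((c :: rest).drop sep.length)
    else (splits sep rest).modifyHead (c :: ·)
termination_by l => l.length
decreasing_by
  all_goals simp_all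
  rename_i h
  have : 1 ≤ sep.length := List.length_pos_of_ne_nil h.2
  omega

theorem splits_ne_nil (sep l : List Char) : splits sep l ≠ [] := by
  induction l using splits.induct sep with
  | case1 => simp [splits]
  | case2 c rest h ih => rw [splits]; simp [h]
  | case3 c rest h ih =>
    rw [splits]; rw [if_neg h]
    intro hc; exact ih (List.modifyHead_eq_nil_iff.mp hc)

theorem go_spec (sep : List Char) (hsep : sep ≠ []) :
    ∀ (fuel : Nat) (l cur : List Char) (acc : List (List Char)), l.length ≤ fuel →
      PySem.Chars.splitOn.go sep fuel l cur acc
        = acc.reverse ++ (splits sep l).modifyHead (cur.reverse ++ ·) := by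
  have hlen : 1 ≤ sep.length := List.length_pos_of_ne_nil hsep
  intro fuel
  induction fuel with
  | zero =>
    intro l cur acc hl
    have : l = [] := List.length_eq_zero_iff.mp (Nat.le_zero.mp hl)
    subst this
    simp [PySem.Chars.splitOn.go, splits]
  | succ fuel ih =>
    intro l cur acc hl
    cases l with
    | nil => simp [PySem.Chars.splitOn.go, splits]
    | cons c rest =>
      simp only [List.length_cons] at hl
      by_cases h : sep.isPrefixOf (c :: rest)
      · have hd : (List.drop sep.length (c :: rest)).length ≤ fuel := by
          simp; omega
        rw [PySem.Chars.splitOn.go]; rw [if_pos h]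
        rw [ih _ _ _ hd]
        rw [splits]; rw [if_pos ⟨h, hsep⟩]
        obtain ⟨q, qs, hq⟩ := List.exists_cons_of_ne_nil (splits_ne_nil sep ((c :: rest).drop sep.length))
        simp [hq]
      · rw [PySem.Chars.splitOn.go]; rw [if_neg h]
        rw [ih _ _ _ (by omega)]
        rw [splits]; rw [if_neg (by simp [h])]
        obtain ⟨q, qs, hq⟩ := List.exists_cons_of_ne_nil (splits_ne_nil sep rest)
        simp [hq]

theorem splitOn_eq_splits (sep l : List Char) (hsep : sep ≠ []) :
    PySem.Chars.splitOn l sep = splits sep l := by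
  rw [PySem.Chars.splitOn, go_spec sep hsep _ _ _ _ (by omega)]
  obtain ⟨q, qs, hq⟩ := List.exists_cons_of_ne_nil (splits_ne_nil sep l)
  simp [hq]

theorem splits_head_prefix (sep l : List Char) (h0 : List Char) (hs : List (List Char))
    (h : splits sep l = h0 :: hs) : h0 <+: l := by
  induction l using splits.induct sep generalizing h0 hs with
  | case1 => rw [splits] at h; simp at h; simp [h.1]
  | case2 c rest hp ih => rw [splits] at h; rw [if_pos hp] at h; simp at h; simp [h.1]
  | case3 c rest hp ih =>
    rw [splits] at h; rw [if_neg hp] at h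
    obtain ⟨q, qs, hq⟩ := List.exists_cons_of_ne_nil (splits_ne_nil sep rest)
    rw [hq] at h; simp at h
    obtain ⟨rfl, -⟩ := h
    exact List.cons_prefix_cons.mpr ⟨rfl, ih q qs hq⟩

def ords (p : List Char) : List Int := p.map (fun c => (c.toNat : Int))

def joinWith (s : List Int) (f : List Char → List Int) : List (List Char) → List Int
  | [] => []
  | p :: rest => f p ++ rest.flatMap (fun q => s ++ f q)

def emit2 (p : List Char) : List Int := joinWith [SUCC_CODE] ords (splits SUCCL p)
def emit1 (l : List Char) : List Int := joinWith [PREC_CODE] emit2 (splits PRECL l)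

theorem emit2_nil : emit2 [] = [] := by
  rw [emit2, splits]; simp [joinWith, ords]

theorem emit2_succ (p : List Char) : emit2 (SUCCL ++ p) = SUCC_CODE :: emit2 p := by
  obtain ⟨q, qs, hq⟩ := List.exists_cons_of_ne_nil (splits_ne_nil SUCCL p)
  rw [emit2, emit2, hq]
  show joinWith _ _ (splits SUCCL ('<' :: 'C' :: 'C' :: 's' :: 'u' :: 'c' :: 'c' :: '>' :: p)) = _
  rw [splits, if_pos ⟨by simp [SUCCL, List.isPrefixOf], by simp [SUCCL]⟩]
  have hdrop : List.drop SUCCL.length ('<' :: 'C' :: 'C' :: 's' :: 'u' :: 'c' :: 'c' :: '>' :: p) = p := by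
    simp [SUCCL]
  rw [hdrop, hq]
  simp [joinWith, ords]

theorem emit2_char (c : Char) (p : List Char) (h : ¬ SUCCL.isPrefixOf (c :: p)) :
    emit2 (c :: p) = (c.toNat : Int) :: emit2 p := by
  obtain ⟨q, qs, hq⟩ := List.exists_cons_of_ne_nil (splits_ne_nil SUCCL p)
  rw [emit2, emit2, hq, splits, if_neg (by simp [h]), hq]
  simp [joinWith, ords]

theorem emit1_prec (l : List Char) : emit1 (PRECL ++ l) = PREC_CODE :: emit1 l := by
  obtain ⟨q, qs, hq⟩ := List.exists_cons_of_ne_nil (splits_ne_nil PRECL l)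
  rw [emit1, emit1, hq]
  show joinWith _ _ (splits PRECL ('<' :: 'C' :: 'C' :: 'p' :: 'r' :: 'e' :: 'c' :: '>' :: l)) = _
  rw [splits, if_pos ⟨by simp [PRECL, List.isPrefixOf], by simp [PRECL]⟩]
  have hdrop : List.drop PRECL.length ('<' :: 'C' :: 'C' :: 'p' :: 'r' :: 'e' :: 'c' :: '>' :: l) = l := by
    simp [PRECL]
  rw [hdrop, hq]
  simp [joinWith, emit2_nil]

-- a SUCC marker never contains the start of a PREC marker, so split-by-PREC absorbs it whole
theorem splits_absorb_succ (l : List Char) :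
    splits PRECL (SUCCL ++ l) = (splits PRECL l).modifyHead (SUCCL ++ ·) := by
  obtain ⟨q, qs, hq⟩ := List.exists_cons_of_ne_nil (splits_ne_nil PRECL l)
  rw [hq]
  show splits PRECL ('<' :: 'C' :: 'C' :: 's' :: 'u' :: 'c' :: 'c' :: '>' :: l) = _
  rw [splits, if_neg (by simp [PRECL, List.isPrefixOf])]
  rw [splits, if_neg (by simp [PRECL, List.isPrefixOf])]
  rw [splits, if_neg (by simp [PRECL, List.isPrefixOf])]
  rw [splits, if_neg (by simp [PRECL, List.isPrefixOf])]
  rw [splits, if_neg (by simp [PRECL, List.isPrefixOf])]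
  rw [splits, if_neg (by simp [PRECL, List.isPrefixOf])]
  rw [splits, if_neg (by simp [PRECL, List.isPrefixOf])]
  rw [splits, if_neg (by simp [PRECL, List.isPrefixOf])]
  rw [hq]
  simp [SUCCL]

theorem emit1_succ (l : List Char) : emit1 (SUCCL ++ l) = SUCC_CODE :: emit1 l := by
  obtain ⟨q, qs, hq⟩ := List.exists_cons_of_ne_nil (splits_ne_nil PRECL l)
  rw [emit1, emit1, splits_absorb_succ, hq]
  simp only [List.modifyHead_cons, joinWith]
  rw [emit2_succ]
  simp

theorem emit1_char (c : Char) (l : List Char) (hp : ¬ PRECL.isPrefixOf (c :: l))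
    (hs : ¬ SUCCL.isPrefixOf (c :: l)) :
    emit1 (c :: l) = (c.toNat : Int) :: emit1 l := by
  obtain ⟨q, qs, hq⟩ := List.exists_cons_of_ne_nil (splits_ne_nil PRECL l)
  rw [emit1, emit1, splits, if_neg (by simp [hp]), hq]
  simp only [List.modifyHead_cons, joinWith]
  rw [emit2_char]
  · simp
  · intro hc
    apply hs
    rw [List.isPrefixOf_iff_prefix] at hc ⊢
    exact hc.trans (List.cons_prefix_cons.mpr ⟨rfl, splits_head_prefix PRECL l q qs hq⟩)

theorem scan_eq (l : List Char) : scanB l = emit1 l := by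
  induction l using scanB.induct with
  | case1 =>
    rw [scanB, emit1, splits]
    simp [joinWith, emit2_nil]
  | case2 c rest h ih =>
    obtain ⟨l', hl'⟩ := List.isPrefixOf_iff_prefix.mp h
    rw [scanB, if_pos h, ih, ← hl', emit1_prec]
    simp [PRECL]
  | case3 c rest hp h ih =>
    obtain ⟨l', hl'⟩ := List.isPrefixOf_iff_prefix.mp h
    rw [scanB, if_neg hp, if_pos h, ih, ← hl', emit1_succ]
    simp [SUCCL]
  | case4 c rest hp hs ih =>
    rw [scanB, if_neg hp, if_neg hs, ih, emit1_char c rest hp hs]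

theorem enum_tail (s : List Int) (f : List Char → List Int) :
    ∀ (ps : List (List Char)) (k : Int), 1 ≤ k →
      (PySem.List.enumerate ps k).flatMap (fun p => (if p.1 > 0 then s else []) ++ f p.2)
        = ps.flatMap (fun q => s ++ f q) := by
  intro ps
  induction ps with
  | nil => intro k _; simp [PySem.List.enumerate]
  | cons p rest ih =>
    intro k hk
    rw [PySem.List.enumerate_cons]
    simp only [List.flatMap_cons]
    rw [ih (k + 1) (by omega)]
    have : k > 0 := by omega
    simp [this]

theorem enum_join (s : List Int) (f : List Char → List Int) (ps : List (List Char)) :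
    (PySem.List.enumerate ps 0).flatMap (fun p => (if p.1 > 0 then s else []) ++ f p.2)
      = joinWith s f ps := by
  cases ps with
  | nil => simp [PySem.List.enumerate, joinWith]
  | cons p rest =>
    rw [PySem.List.enumerate_cons]
    simp only [List.flatMap_cons]
    rw [enum_tail s f rest (0 + 1) (by omega)]
    simp [joinWith]

theorem inner_eq (p : List Char) :
    (PySem.List.enumerate (PySem.Chars.splitOn p SUCCL) 0).flatMap (fun jp =>
        (if jp.1 > 0 then [SUCC_CODE] else []) ++ jp.2.map (fun c => (c.toNat : Int)))
      = emit2 p := by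
  rw [splitOn_eq_splits SUCCL p (by simp [SUCCL]), emit2]
  exact enum_join [SUCC_CODE] ords (splits SUCCL p)

-- ===== VERDICT (by name: the statement is the Claim_ definition above) =====
theorem seq_from_t_spec : Claim_equal_seq_from_t := by
  intro t _
  unfold Spec_seq_from_t seq_from_t seq_from_t_alt
  by_cases h : t == ""
  · simp [h]
  · rw [if_neg (by simp_all), if_neg (by simp_all)]
    rw [scan_eq]
    simp only [inner_eq]
    rw [splitOn_eq_splits PRECL t.toList (by simp [PRECL])]
    rw [enum_join [PREC_CODE] emit2 (splits PRECL t.toList)]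
    rfl
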